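-- pv_equiv track=rewrite | github.com/ariesduanmu/ctf_challenges | codefights/frisbees/treetest.py | notree
-- ===== SOURCE A (Python) =====
-- def notree(points):
--     distance = lambda f, s: (f[0] - s[0])**2 + (f[1] - s[1])**2
--     throwable_points = []
--     for s in points:
--         reachable_points = [
--             (i, distance(f, s))
--             for i, f in enumerate(points)
--             if s != f and distance(f, s) <= s[2]**2
--         ]
--         throwable_points.append([
--             i for i, _ in sorted(reachable_points, key=lambda i: i[1], reverse=True)
--         ])
--         # throwable_points.append([
--         #     i for i, _ in reachable_points
--         # ])
--     return throwable_points
-- ===== SOURCE B (Python) =====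
-- def notree(points):
--     result = []
--     for s in points:
--         limit = s[2] ** 2
--         ordered = []  # (distance, index) pairs kept sorted by distance descending, stable
--         for j, f in enumerate(points):
--             if f != s:
--                 d = (f[0] - s[0]) ** 2 + (f[1] - s[1]) ** 2
--                 if d <= limit:
--                     # stable insertion: before the first entry strictly closer than d
--                     k = 0
--                     while k < len(ordered) and ordered[k][0] >= d:
--                         k += 1
--                     ordered.insert(k, (d, j))
--         result.append([j for _, j in ordered])
--     return result
-- ===== Notes on version B (the rewrite author's own statement) =====
-- stated objective: alternative
-- what changed: B never builds a candidate list nor calls sorted: one fused pass per source computes each distance once and stably inserts (distance, index) into a list kept in descending-distance order (online insertion sort), then projects the indices.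
import Mathlib
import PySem

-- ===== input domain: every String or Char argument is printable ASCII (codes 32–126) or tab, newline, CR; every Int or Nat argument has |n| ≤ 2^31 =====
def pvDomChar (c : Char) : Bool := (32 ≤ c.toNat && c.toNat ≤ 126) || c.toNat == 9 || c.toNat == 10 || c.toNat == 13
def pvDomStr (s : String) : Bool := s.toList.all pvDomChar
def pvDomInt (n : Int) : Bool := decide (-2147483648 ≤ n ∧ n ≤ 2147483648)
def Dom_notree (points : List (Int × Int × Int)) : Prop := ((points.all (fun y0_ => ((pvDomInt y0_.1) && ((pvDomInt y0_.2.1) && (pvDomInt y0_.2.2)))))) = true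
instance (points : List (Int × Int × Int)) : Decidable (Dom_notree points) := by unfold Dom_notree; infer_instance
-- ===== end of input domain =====

-- B replaces A's collect-candidates-then-stable-sort by a single fused pass per source that computes
-- each distance once and stably inserts into a list kept in descending-distance order (online insertion sort).

-- ===== PORT A =====
def notree (points : List (Int × Int × Int)) : List (List Int) :=
  List.foldl (fun throwable s =>
      let reachable :=
        List.map (fun p => (p.1, (p.2.1 - s.1) ^ 2 + (p.2.2.1 - s.2.1) ^ 2))
          (List.filter (fun p => decide (s ≠ p.2) &&
              decide ((p.2.1 - s.1) ^ 2 + (p.2.2.1 - s.2.1) ^ 2 ≤ s.2.2 ^ 2))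
            (PySem.List.enumerate points))
      throwable ++ [List.map (fun q => q.1) (PySem.List.sorted reachable (fun q => q.2) true)])
    [] points

-- ===== PORT B =====
-- The Python's find-position-while-loop + list.insert places (d, j) before the first entry whose
-- stored distance is strictly below d; PySem.List.insertBy with that 'before' test is exactly that step.
def notree_alt (points : List (Int × Int × Int)) : List (List Int) :=
  List.foldl (fun result s =>
      let limit := s.2.2 ^ 2
      let ordered :=
        List.foldl (fun ord p =>
            if p.2 ≠ s then
              let d := (p.2.1 - s.1) ^ 2 + (p.2.2.1 - s.2.1) ^ 2
              if d ≤ limit then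
                PySem.List.insertBy (fun x y => decide (y.1 < x.1)) (d, p.1) ord
              else ord
            else ord)
          ([] : List (Int × Int)) (PySem.List.enumerate points)
      result ++ [List.map (fun q => q.2) ordered])
    [] points

-- ===== PRECONDITION & SPEC =====
def Spec_notree (points : List (Int × Int × Int)) (out : List (List Int)) : Prop := out = notree_alt points
instance (points : List (Int × Int × Int)) (out : List (List Int)) : Decidable (Spec_notree points out) := by unfold Spec_notree; infer_instance

-- ===== CLAIM (what is proved, stated in full; the proofs are below) =====
def Claim_equal_notree : Prop := ∀ (points : List (Int × Int × Int)), Dom_notree points → Spec_notree points (notree points)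

-- ===== LEMMAS AND PROOFS =====

lemma insertBy_swap (x : Int × Int) (l : List (Int × Int)) :
    PySem.List.insertBy (fun a c => decide (c.1 < a.1)) x.swap (l.map Prod.swap)
      = (PySem.List.insertBy (fun a c => decide (c.2 < a.2)) x l).map Prod.swap := by
  induction l with
  | nil => rfl
  | cons c C ih =>
      simp only [List.map_cons, PySem.List.insertBy, Prod.swap]
      by_cases h : c.2 < x.2
      · simp [h, Prod.swap]
      · simpa [h, Prod.swap] using ih

lemma foldl_insertBy_swap (L : List (Int × Int)) (acc : List (Int × Int)) :
    List.foldl (fun a x => PySem.List.insertBy (fun x y => decide (y.1 < x.1)) x a)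
        (acc.map Prod.swap) (L.map Prod.swap)
      = (List.foldl (fun a x => PySem.List.insertBy (fun a c => decide (c.2 < a.2)) x a) acc L).map
          Prod.swap := by
  induction L generalizing acc with
  | nil => rfl
  | cons c C ih =>
      simp only [List.map_cons, List.foldl_cons]
      rw [insertBy_swap, ih]

lemma inner_eq (points : List (Int × Int × Int)) (s : Int × Int × Int) :
    List.map (fun q => q.1)
      (PySem.List.sorted
        (List.map (fun p => (p.1, (p.2.1 - s.1) ^ 2 + (p.2.2.1 - s.2.1) ^ 2))
          (List.filter (fun p => decide (s ≠ p.2) &&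
              decide ((p.2.1 - s.1) ^ 2 + (p.2.2.1 - s.2.1) ^ 2 ≤ s.2.2 ^ 2))
            (PySem.List.enumerate points)))
        (fun q => q.2) true)
    = List.map (fun q => q.2)
        (List.foldl (fun ord p =>
            if p.2 ≠ s then
              if (p.2.1 - s.1) ^ 2 + (p.2.2.1 - s.2.1) ^ 2 ≤ s.2.2 ^ 2 then
                PySem.List.insertBy (fun x y => decide (y.1 < x.1))
                  ((p.2.1 - s.1) ^ 2 + (p.2.2.1 - s.2.1) ^ 2, p.1) ord
              else ord
            else ord)
          ([] : List (Int × Int)) (PySem.List.enumerate points)) := by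
  -- B's fused loop = fold of stable insertions over the filtered, mapped candidates
  have hB : (List.foldl (fun ord p =>
        if p.2 ≠ s then
          if (p.2.1 - s.1) ^ 2 + (p.2.2.1 - s.2.1) ^ 2 ≤ s.2.2 ^ 2 then
            PySem.List.insertBy (fun x y => decide (y.1 < x.1))
              ((p.2.1 - s.1) ^ 2 + (p.2.2.1 - s.2.1) ^ 2, p.1) ord
          else ord
        else ord)
      ([] : List (Int × Int)) (PySem.List.enumerate points))
      = List.foldl (fun a x => PySem.List.insertBy (fun x y => decide (y.1 < x.1)) x a)
          ([] : List (Int × Int))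
          (List.map (fun p => ((p.2.1 - s.1) ^ 2 + (p.2.2.1 - s.2.1) ^ 2, p.1))
            (List.filter (fun p => decide (s ≠ p.2) &&
                decide ((p.2.1 - s.1) ^ 2 + (p.2.2.1 - s.2.1) ^ 2 ≤ s.2.2 ^ 2))
              (PySem.List.enumerate points))) := by
    have h1 := PySem.List.foldl_congr_mem (PySem.List.enumerate points)
      (fun ord p =>
        if p.2 ≠ s then
          if (p.2.1 - s.1) ^ 2 + (p.2.2.1 - s.2.1) ^ 2 ≤ s.2.2 ^ 2 then
            PySem.List.insertBy (fun x y => decide (y.1 < x.1))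
              ((p.2.1 - s.1) ^ 2 + (p.2.2.1 - s.2.1) ^ 2, p.1) ord
          else ord
        else ord)
      (fun ord p =>
        if p.2 ≠ s ∧ (p.2.1 - s.1) ^ 2 + (p.2.2.1 - s.2.1) ^ 2 ≤ s.2.2 ^ 2 then
          PySem.List.insertBy (fun x y => decide (y.1 < x.1))
            ((p.2.1 - s.1) ^ 2 + (p.2.2.1 - s.2.1) ^ 2, p.1) ord
        else ord)
      ([] : List (Int × Int))
      (by
        intro acc p _
        by_cases hp1 : p.2 ≠ s <;> by_cases hp2 :
            (p.2.1 - s.1) ^ 2 + (p.2.2.1 - s.2.1) ^ 2 ≤ s.2.2 ^ 2 <;> simp [hp1, hp2])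
    rw [h1]
    rw [PySem.List.foldl_ite_eq_foldl_filter
      (fun p : Int × (Int × Int × Int) =>
        p.2 ≠ s ∧ (p.2.1 - s.1) ^ 2 + (p.2.2.1 - s.2.1) ^ 2 ≤ s.2.2 ^ 2)
      (fun ord p =>
        PySem.List.insertBy (fun x y => decide (y.1 < x.1))
          ((p.2.1 - s.1) ^ 2 + (p.2.2.1 - s.2.1) ^ 2, p.1) ord)
      (PySem.List.enumerate points) ([] : List (Int × Int))]
    rw [List.filter_congr (q := fun p => decide (s ≠ p.2) &&
        decide ((p.2.1 - s.1) ^ 2 + (p.2.2.1 - s.2.1) ^ 2 ≤ s.2.2 ^ 2))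
      (by
        intro p _
        rw [Bool.decide_and, decide_eq_decide.mpr ne_comm])]
    rw [List.foldl_map]
  rw [hB]
  -- A's sorted = fold of stable insertions over the (index, distance) candidates
  rw [PySem.List.sorted_rev_eq_foldl_insertBy]
  -- the two folds are related by Prod.swap
  have hswap : (List.map (fun p => ((p.2.1 - s.1) ^ 2 + (p.2.2.1 - s.2.1) ^ 2, p.1))
        (List.filter (fun p => decide (s ≠ p.2) &&
            decide ((p.2.1 - s.1) ^ 2 + (p.2.2.1 - s.2.1) ^ 2 ≤ s.2.2 ^ 2))
          (PySem.List.enumerate points)))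
      = (List.map (fun p => (p.1, (p.2.1 - s.1) ^ 2 + (p.2.2.1 - s.2.1) ^ 2))
          (List.filter (fun p => decide (s ≠ p.2) &&
              decide ((p.2.1 - s.1) ^ 2 + (p.2.2.1 - s.2.1) ^ 2 ≤ s.2.2 ^ 2))
            (PySem.List.enumerate points))).map Prod.swap := by
    simp [List.map_map, Function.comp, Prod.swap]
  rw [hswap]
  have h0 : ([] : List (Int × Int)) = ([] : List (Int × Int)).map Prod.swap := rfl
  rw [h0, foldl_insertBy_swap]
  simp [List.map_map, Function.comp, Prod.swap]

lemma notree_eq_alt (points : List (Int × Int × Int)) : notree points = notree_alt points := by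
  unfold notree notree_alt
  refine PySem.List.foldl_congr_mem _ _ _ _ (fun acc s _ => ?_)
  simp only []
  rw [inner_eq]

-- ===== VERDICT (by name: the statement is the Claim_ definition above) =====
theorem notree_spec : Claim_equal_notree := by
  intro points _
  unfold Spec_notree
  exact notree_eq_alt points
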